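-- pv_equiv track=rewrite | github.com/735166094/RAGFLOW | chunking/hierarchical_chunker.py | _get_chunk_type
-- ===== SOURCE A (Python) =====
-- from typing import List, Dict, Any, Optional
--
-- def _get_chunk_type(items: List[Dict]) -> str:
--     """判断切片类型"""
--     types = [item["type"] for item in items]
--     if "section" in types:
--         return "section"
--     elif "formula" in types:
--         return "formula_chunk"
--     elif "table" in types:
--         return "table_chunk"
--     else:
--         return "text_chunk"
-- ===== SOURCE B (Python) =====
-- from typing import List, Dict
--
-- def _get_chunk_type(items: List[Dict]) -> str:
--     rank = {"section": 3, "formula": 2, "table": 1}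
--     names = ["text_chunk", "table_chunk", "formula_chunk", "section"]
--     return names[max((rank.get(item["type"], 0) for item in items), default=0)]
-- ===== Notes on version B (the rewrite author's own statement) =====
-- stated objective: alternative
-- what changed: Replaces A's materialized type list plus cascade of three membership scans by a rank table: map each item's type to a numeric priority, take the max, and index a name table with it.
import Mathlib
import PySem

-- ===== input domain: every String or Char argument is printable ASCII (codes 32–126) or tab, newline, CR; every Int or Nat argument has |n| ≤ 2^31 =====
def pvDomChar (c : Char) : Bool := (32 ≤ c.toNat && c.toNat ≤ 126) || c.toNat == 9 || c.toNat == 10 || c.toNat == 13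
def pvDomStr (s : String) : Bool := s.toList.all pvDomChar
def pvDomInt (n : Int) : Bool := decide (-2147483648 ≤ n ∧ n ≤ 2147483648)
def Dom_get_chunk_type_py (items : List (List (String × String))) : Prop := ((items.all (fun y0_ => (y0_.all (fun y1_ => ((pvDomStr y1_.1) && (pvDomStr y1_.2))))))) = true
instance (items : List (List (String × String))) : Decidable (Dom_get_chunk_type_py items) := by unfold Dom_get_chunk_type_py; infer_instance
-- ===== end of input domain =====

-- B replaces A's materialized type list plus three membership scans by a rank table:
-- map each type to a numeric priority, take the max, index a name table (objective: alternative).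

-- ===== PORT A =====
-- item["type"]: first-match association-list lookup; Pre_ guarantees the key exists,
-- so the default "" is never used on admitted inputs.
def pvItemType (d : List (String × String)) : String :=
  (((d.find? (fun p => p.1 == "type")).map (fun p => p.2)).getD "")

def get_chunk_type_py (items : List (List (String × String))) : String :=
  let types := items.map pvItemType
  if types.contains "section" then "section"
  else if types.contains "formula" then "formula_chunk"
  else if types.contains "table" then "table_chunk"
  else "text_chunk"

-- ===== PORT B =====
-- rank = {"section": 3, "formula": 2, "table": 1}
def pvRankDict : PySem.Dict String Int :=
  PySem.Dict.ofList [("section", 3), ("formula", 2), ("table", 1)]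

-- names[max((rank.get(item["type"], 0) for item in items), default=0)]
-- the index is always 0..3, so pyGet?'s none branch (IndexError) is unreachable
def get_chunk_type_py_alt (items : List (List (String × String))) : String :=
  let best := (items.map (fun d => pvRankDict.getD (pvItemType d) 0)).foldl max 0
  ((PySem.List.pyGet? ["text_chunk", "table_chunk", "formula_chunk", "section"] best).getD "")

-- ===== PRECONDITION & SPEC =====
-- Pre_ excludes items lacking a "type" key, on which both Pythons raise KeyError.
def Pre_get_chunk_type_py (items : List (List (String × String))) : Prop :=
  (items.all (fun d => d.any (fun p => p.1 == "type"))) = true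
instance (items : List (List (String × String))) : Decidable (Pre_get_chunk_type_py items) := by unfold Pre_get_chunk_type_py; infer_instance
def pvWitness_get_chunk_type_py : (List (List (String × String))) :=
  [[("type", "table")], [("type", "text")]]

def Spec_get_chunk_type_py (items : List (List (String × String))) (out : String) : Prop := out = get_chunk_type_py_alt items
instance (items : List (List (String × String))) (out : String) : Decidable (Spec_get_chunk_type_py items out) := by unfold Spec_get_chunk_type_py; infer_instance

-- ===== CLAIM (what is proved, stated in full; the proofs are below) =====
def Claim_equal_get_chunk_type_py : Prop := ∀ (items : List (List (String × String))), Dom_get_chunk_type_py items → Pre_get_chunk_type_py items → Spec_get_chunk_type_py items (get_chunk_type_py items)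

-- ===== LEMMAS AND PROOFS =====
theorem pv_rank_eq (t : String) :
    pvRankDict.getD t 0 =
      if t == "section" then 3 else if t == "formula" then 2 else if t == "table" then 1 else 0 := by
  show (((PySem.Dict.empty.insert "section" (3:Int)).insert "formula" 2).insert "table" 1).getD t 0 = _
  simp only [PySem.Dict.getD_insert, PySem.Dict.getD_empty]
  split_ifs <;> simp_all

theorem pv_contains_map (l : List (List (String × String))) (a : String) :
    (l.map pvItemType).contains a = l.any (fun d => pvItemType d == a) := by
  induction l with
  | nil => rfl
  | cons x xs ih =>
      simp only [List.map_cons, List.contains_cons, List.any_cons, ih]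
      rw [BEq.comm]

theorem pv_fold_max (l : List (List (String × String))) (a : Int)
    (h0 : 0 ≤ a) (h3 : a ≤ 3) :
    (l.map (fun d => pvRankDict.getD (pvItemType d) 0)).foldl max a =
      max a
        (if l.any (fun d => pvItemType d == "section") then 3
         else if l.any (fun d => pvItemType d == "formula") then 2
         else if l.any (fun d => pvItemType d == "table") then 1
         else 0) := by
  induction l generalizing a with
  | nil => simp; omega
  | cons x xs ih =>
      simp only [List.map_cons, List.foldl_cons, List.any_cons]
      rw [pv_rank_eq]
      by_cases hs : pvItemType x == "section" <;>
      by_cases hf : pvItemType x == "formula" <;>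
      by_cases ht : pvItemType x == "table" <;>
        simp only [hs, hf, ht, Bool.true_or, Bool.false_or, if_true] <;>
        rw [ih _ (by omega) (by omega)] <;>
        split_ifs <;> first | omega | simp_all

theorem get_chunk_type_py_spec : Claim_equal_get_chunk_type_py := by
  intro items _ _
  unfold Spec_get_chunk_type_py get_chunk_type_py get_chunk_type_py_alt
  rw [pv_fold_max items 0 (by omega) (by omega)]
  simp only [pv_contains_map]
  split_ifs <;> rfl
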